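-- pv_equiv track=rewrite | github.com/MuhammadMehdiRaza/AI_Semester_Project | AI_Project/data/generated_dataset/files/code_trans_200.py | fn_1
-- ===== SOURCE A (Python) =====
-- def fn_1(v2: list[int], v9: int) -> int:
--     """
--     Finds the smallest element of longest v2
--
--     >>> fn_1(v2=[0, 0, 0, 0, 0, 0, 6], v9=6)
--     6
--     """
--
--     v8 = 0
--     v10 = 0
--     for v22 in range(2, len(v2)):
--         v23 = {v22}
--         v3 = v2[v22]
--         v7 = 1
--
--         while v3 > 1 and v3 <= v9 and v3 not in v23:
--             v23.add(v3)
--             v3 = v2[v3]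
--             v7 += 1
--
--         if v3 == v22 and v7 > v8:
--             v8 = v7
--             v10 = v22
--
--     return v10
-- ===== SOURCE B (Python) =====
-- def _first_return(v2, v9, s, n):
--     """Length of the walk s -> v2[s] -> ... at its first return to s, staying on
--     values in (1, v9]; None if it stops or fails to return within n steps
--     (a returning walk is a cycle of distinct indices, so n steps always suffice)."""
--     x = v2[s]
--     for k in range(1, n + 1):
--         if x == s:
--             return k
--         if not (1 < x <= v9):
--             return None
--         x = v2[x]
--     return None
--
--
-- def fn_1(v2: list[int], v9: int) -> int:
--     n = len(v2)
--     best_len = 0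
--     best_idx = 0
--     for s in range(2, n):
--         k = _first_return(v2, v9, s, n)
--         if k is not None and k > best_len:
--             best_len, best_idx = k, s
--     return best_idx
-- ===== Notes on version B (the rewrite author's own statement) =====
-- stated objective: alternative
-- what changed: B drops A's growing visited-set: a helper walks x -> v2[x] over values in (1, v9] for at most len(v2) steps (pigeonhole: a returning walk is a cycle of distinct indices) and reports the step of the first return to the start, so repeat detection needs no set and only constant extra memory per start.
import Mathlib
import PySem

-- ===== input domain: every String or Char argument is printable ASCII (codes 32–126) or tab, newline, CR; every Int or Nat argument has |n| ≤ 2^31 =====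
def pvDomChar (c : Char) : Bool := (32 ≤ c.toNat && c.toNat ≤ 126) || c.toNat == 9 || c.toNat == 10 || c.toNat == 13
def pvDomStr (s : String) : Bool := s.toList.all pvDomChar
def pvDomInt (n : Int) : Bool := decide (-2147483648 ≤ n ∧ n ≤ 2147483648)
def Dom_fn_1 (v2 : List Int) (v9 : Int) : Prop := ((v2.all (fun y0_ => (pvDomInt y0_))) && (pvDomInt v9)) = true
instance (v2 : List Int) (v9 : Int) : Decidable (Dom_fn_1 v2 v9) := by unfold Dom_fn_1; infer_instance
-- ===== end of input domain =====

-- B replaces A's visited-set repeat detection by a set-free bounded first-return walk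
-- (alternative mechanism, constant extra memory); equivalence is proved on Pre_fn_1.

-- ===== PORT A =====
-- A's inner 'while' loop: state (v23, v3, v7).  The fuel (length+2) is an artifact of
-- totalisation only: under Pre_fn_1 the loop stops strictly earlier (each iteration adds a
-- fresh in-range value to v23), proved below.  'none' from pyGet? = Python IndexError
-- (A raises there; such inputs are outside Pre_fn_1, the port returns the current state).
def fn1While (v2 : List Int) (v9 : Int) : Nat → PySem.Set Int → Int → Int → Int × Int
  | 0, _, v3, v7 => (v3, v7)
  | fuel + 1, v23, v3, v7 =>
    if 1 < v3 ∧ v3 ≤ v9 ∧ ¬ v3 ∈ v23 then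
      match PySem.List.pyGet? v2 v3 with
      | some x => fn1While v2 v9 fuel (PySem.Set.add v23 v3) x (v7 + 1)
      | none => (v3, v7)
    else (v3, v7)

def fn_1 (v2 : List Int) (v9 : Int) : Int :=
  let st := (PySem.List.pyRange 2 (v2.length : Int) 1).foldl (fun (st : Int × Int) v22 =>
    match PySem.List.pyGet? v2 v22 with
    | some v30 =>
      let r := fn1While v2 v9 (v2.length + 2) (PySem.Set.ofList [v22]) v30 1
      if r.1 = v22 ∧ r.2 > st.1 then (r.2, v22) else st
    | none => st) (0, 0)
  st.2

-- ===== PORT B =====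
-- '_first_return': walk x -> v2[x] on values in (1, v9], no visited set; the 'for k in
-- range(1, n+1)' is the list the loop consumes.  'none' from pyGet? = IndexError (outside Pre_).
def firstReturnLoop (v2 : List Int) (v9 s : Int) : Int → List Int → Option Int
  | _, [] => none
  | x, k :: ks =>
    if x = s then some k
    else if ¬ (1 < x ∧ x ≤ v9) then none
    else
      match PySem.List.pyGet? v2 x with
      | some x' => firstReturnLoop v2 v9 s x' ks
      | none => none

def firstReturn (v2 : List Int) (v9 s n : Int) : Option Int :=
  match PySem.List.pyGet? v2 s with
  | some x => firstReturnLoop v2 v9 s x (PySem.List.pyRange 1 (n + 1) 1)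
  | none => none

def fn_1_alt (v2 : List Int) (v9 : Int) : Int :=
  let n : Int := v2.length
  let best := (PySem.List.pyRange 2 n 1).foldl (fun (best : Int × Int) s =>
    match firstReturn v2 v9 s n with
    | some k => if k > best.1 then (k, s) else best
    | none => best) (0, 0)
  best.2

-- ===== PRECONDITION & SPEC =====
-- Pre_ excludes exactly the inputs on which A raises IndexError: every value of the list
-- (positions ≥ 2, the only ones a walk can read) that the walk may use as an index
-- (i.e. lies in (1, v9]) must be a valid index.
def Pre_fn_1 (v2 : List Int) (v9 : Int) : Prop :=
  ∀ x ∈ v2.drop 2, 1 < x → x ≤ v9 → x < (v2.length : Int)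
instance (v2 : List Int) (v9 : Int) : Decidable (Pre_fn_1 v2 v9) := by
  unfold Pre_fn_1; infer_instance
def pvWitness_fn_1 : List Int × Int := ([0, 0, 0, 0, 0, 0, 6], 6)

def Spec_fn_1 (v2 : List Int) (v9 : Int) (out : Int) : Prop := out = fn_1_alt v2 v9
instance (v2 : List Int) (v9 : Int) (out : Int) : Decidable (Spec_fn_1 v2 v9 out) := by unfold Spec_fn_1; infer_instance

-- ===== CLAIM (what is proved, stated in full; the proofs are below) =====
def Claim_equal_fn_1 : Prop := ∀ (v2 : List Int) (v9 : Int), Dom_fn_1 v2 v9 → Pre_fn_1 v2 v9 → Spec_fn_1 v2 v9 (fn_1 v2 v9)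

-- ===== LEMMAS AND PROOFS =====

-- the walk both programs follow: pvX i = the value after i steps of x ↦ v2[x] from s
def pvX (v2 : List Int) (s : Int) : Nat → Option Int
  | 0 => some s
  | i + 1 => (pvX v2 s i).bind (fun x => PySem.List.pyGet? v2 x)

-- 'the walk first returns to s at step k with every intermediate value in (1, v9]'
def pvRet (v2 : List Int) (v9 s : Int) (k : Nat) : Prop :=
  1 ≤ k ∧ pvX v2 s k = some s ∧
    ∀ i, 1 ≤ i → i < k → ∃ x, pvX v2 s i = some x ∧ 1 < x ∧ x ≤ v9

lemma pvX_shift (v2 : List Int) (s y : Int) (i : Nat) (h : pvX v2 s i = some y) :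
    ∀ t, pvX v2 s (i + t) = pvX v2 y t := by
  intro t
  induction t with
  | zero => simpa [pvX] using h
  | succ t ih => simp [pvX, ih]

lemma pvX_det (v2 : List Int) (s y : Int) (i l : Nat)
    (hi : pvX v2 s i = some y) (hl : pvX v2 s l = some y) :
    ∀ t, pvX v2 s (i + t) = pvX v2 s (l + t) := by
  intro t; rw [pvX_shift v2 s y i hi t, pvX_shift v2 s y l hl t]

-- minimality: the walk never visits s strictly before the first return
lemma pvRet_not_s (v2 : List Int) (v9 s : Int) (p : Nat)
    (hp : pvRet v2 v9 s p) (hmin : ∀ q, q < p → ¬ pvRet v2 v9 s q) :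
    ∀ i, 1 ≤ i → i < p → pvX v2 s i ≠ some s := by
  intro i h1 hip hcon
  exact hmin i hip ⟨h1, hcon, fun j hj1 hji => hp.2.2 j hj1 (hji.trans hip)⟩

-- minimality: the values before the first return are pairwise distinct
lemma pvRet_distinct (v2 : List Int) (v9 s : Int) (p : Nat)
    (hp : pvRet v2 v9 s p) (hmin : ∀ q, q < p → ¬ pvRet v2 v9 s q) :
    ∀ l i, 1 ≤ l → l < i → i < p → pvX v2 s l ≠ pvX v2 s i := by
  intro l i h1 hli hip hcon
  obtain ⟨y, hy, -⟩ := hp.2.2 l h1 (hli.trans hip)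
  have hiy : pvX v2 s i = some y := by rw [← hcon]; exact hy
  have hs : pvX v2 s (l + (p - i)) = pvX v2 s (i + (p - i)) := pvX_det v2 s y l i hy hiy _
  rw [Nat.add_sub_cancel' (le_of_lt hip)] at hs
  rw [hp.2.1] at hs
  exact pvRet_not_s v2 v9 s p hp hmin (l + (p - i)) (by omega) (by omega) hs

-- a value read at an index ≥ 2 is an element of v2.drop 2
lemma pyGet_drop2 (v2 : List Int) (idx x : Int) (h2 : 2 ≤ idx)
    (h : PySem.List.pyGet? v2 idx = some x) : x ∈ v2.drop 2 := by
  have h0 : (0 : Int) ≤ idx := by omega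
  rw [PySem.List.pyGet?_of_nonneg v2 h0] at h
  have hlt : idx.toNat < v2.length := by
    by_contra hge
    rw [List.getElem?_eq_none (by omega)] at h
    simp at h
  have hx : v2[idx.toNat] = x := by
    rw [List.getElem?_eq_getElem hlt] at h; exact Option.some.inj h
  have h2n : 2 ≤ idx.toNat := by omega
  have hmem : (v2.drop 2)[idx.toNat - 2]'(by simp [List.length_drop]; omega) = x := by
    rw [List.getElem_drop]
    simpa [Nat.add_sub_cancel' h2n] using hx
  exact hmem ▸ List.getElem_mem _

-- every intermediate walk value is an element of v2.drop 2
lemma pvX_mem_drop2 (v2 : List Int) (v9 s : Int) (p : Nat) (hs : 2 ≤ s)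
    (hp : pvRet v2 v9 s p) :
    ∀ i, 1 ≤ i → i ≤ p → ∀ x, pvX v2 s i = some x → x ∈ v2.drop 2 := by
  intro i h1 hip x hx
  obtain ⟨m, rfl⟩ : ∃ m, i = m + 1 := ⟨i - 1, by omega⟩
  rw [pvX] at hx
  cases hy : pvX v2 s m with
  | none => rw [hy] at hx; simp at hx
  | some y =>
    rw [hy] at hx
    have h2y : 2 ≤ y := by
      rcases Nat.eq_zero_or_pos m with hm | hm
      · subst hm; simp [pvX] at hy; omega
      · obtain ⟨z, hz, hz1, -⟩ := hp.2.2 m hm (by omega)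
        rw [hy] at hz; have := Option.some.inj hz; omega
    exact pyGet_drop2 v2 y x h2y hx

-- pigeonhole: under Pre_, the first return happens within v2.length - 1 steps
lemma pvRet_lt_len (v2 : List Int) (v9 s : Int) (p : Nat)
    (hPre : Pre_fn_1 v2 v9) (hs2 : 2 ≤ s) (hsn : s < (v2.length : Int))
    (hp : pvRet v2 v9 s p) (hmin : ∀ q, q < p → ¬ pvRet v2 v9 s q) :
    p < v2.length := by
  have hn3 : 3 ≤ v2.length := by omega
  set n := v2.length with hn
  have hmaps : ∀ i ∈ Finset.Ico 1 p,
      (pvX v2 s i).getD 0 ∈ Finset.Icc (2 : ℤ) ((n : Int) - 1) := by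
    intro i hi
    rw [Finset.mem_Ico] at hi
    obtain ⟨x, hx, hx1, hx9⟩ := hp.2.2 i hi.1 hi.2
    have hxd : x ∈ v2.drop 2 := pvX_mem_drop2 v2 v9 s p hs2 hp i hi.1 (by omega) x hx
    have := hPre x hxd hx1 hx9
    rw [hx]; simp [Finset.mem_Icc]; omega
  have key : ∀ a b, 1 ≤ a → a < b → b < p →
      (pvX v2 s a).getD 0 ≠ (pvX v2 s b).getD 0 := by
    intro a b ha hab hbp hcon
    obtain ⟨xa, hxa, -⟩ := hp.2.2 a ha (by omega)
    obtain ⟨xb, hxb, -⟩ := hp.2.2 b (by omega) hbp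
    rw [hxa, hxb] at hcon
    simp at hcon
    exact pvRet_distinct v2 v9 s p hp hmin a b ha hab hbp (by rw [hxa, hxb, hcon])
  have hinj : Set.InjOn (fun i => (pvX v2 s i).getD 0) (Finset.Ico 1 p) := by
    intro a ha b hb hab
    simp only [Finset.coe_Ico, Set.mem_Ico] at ha hb
    by_contra hne
    rcases Nat.lt_or_ge a b with h | h
    · exact key a b ha.1 h hb.2 hab
    · exact key b a hb.1 (by omega) ha.2 hab.symm
  have hcard := Finset.card_le_card_of_injOn _ hmaps hinj
  rw [Nat.card_Ico, Int.card_Icc] at hcard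
  omega

-- run of A's while loop when the walk first returns at step p
lemma Arun_ret (v2 : List Int) (v9 s : Int) (p : Nat)
    (hp : pvRet v2 v9 s p) (hmin : ∀ q, q < p → ¬ pvRet v2 v9 s q) :
    ∀ fuel j v23 x, 1 ≤ j → j ≤ p → pvX v2 s j = some x → p - j < fuel →
      (∀ y : Int, y ∈ v23 ↔ (y = s ∨ ∃ i, 1 ≤ i ∧ i < j ∧ pvX v2 s i = some y)) →
      fn1While v2 v9 fuel v23 x (j : Int) = (s, (p : Int)) := by
  intro fuel
  induction fuel with
  | zero => intro j v23 x h1 hjp hx hfu hinv; omega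
  | succ fuel ih =>
    intro j v23 x h1 hjp hx hfu hinv
    rcases Nat.eq_or_lt_of_le hjp with hj | hj
    · -- j = p : x = s, s ∈ v23, loop stops
      subst hj
      have hxs : x = s := by rw [hp.2.1] at hx; exact (Option.some.inj hx).symm
      subst hxs
      have : x ∈ v23 := (hinv x).2 (Or.inl rfl)
      rw [fn1While, if_neg (by tauto)]
    · -- j < p : condition holds, step
      obtain ⟨x', hx', hx1, hx9⟩ := hp.2.2 j h1 hj
      have hxx : x' = x := by rw [hx'] at hx; exact Option.some.inj hx
      rw [hxx] at hx1 hx9 hx'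
      have hnots : x ≠ s := fun h => pvRet_not_s v2 v9 s p hp hmin j h1 hj (h ▸ hx')
      have hnotm : ¬ x ∈ v23 := by
        rw [hinv x]
        rintro (h | ⟨i, hi1, hij, hxi⟩)
        · exact hnots h
        · exact pvRet_distinct v2 v9 s p hp hmin i j hi1 hij hj (hxi.trans hx'.symm)
      have hnext : ∃ z, PySem.List.pyGet? v2 x = some z := by
        have hXj1 : pvX v2 s (j + 1) = (some x).bind (fun y => PySem.List.pyGet? v2 y) := by
          rw [pvX, hx']
        rcases Nat.eq_or_lt_of_le (Nat.succ_le_of_lt hj) with h | h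
        · exact ⟨s, by have := hp.2.1; rw [← h, hXj1] at this; simpa using this⟩
        · obtain ⟨z, hz, -⟩ := hp.2.2 (j + 1) (by omega) h
          exact ⟨z, by rw [hXj1] at hz; simpa using hz⟩
      obtain ⟨z, hz⟩ := hnext
      rw [fn1While, if_pos ⟨hx1, hx9, hnotm⟩, hz]
      have hXz : pvX v2 s (j + 1) = some z := by rw [pvX, hx']; simpa using hz
      have hcast : ((j : Int) + 1) = ((j + 1 : Nat) : Int) := by push_cast; ring
      rw [hcast]
      refine ih (j + 1) _ z (by omega) hj hXz (by omega) ?_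
      intro y
      rw [PySem.Set.mem_add, hinv y]
      constructor
      · rintro ((h | ⟨i, hi1, hij, hyi⟩) | h)
        · exact Or.inl h
        · exact Or.inr ⟨i, hi1, by omega, hyi⟩
        · exact Or.inr ⟨j, h1, by omega, h ▸ hx'⟩
      · rintro (h | ⟨i, hi1, hij, hyi⟩)
        · exact Or.inl (Or.inl h)
        · rcases Nat.lt_or_ge i j with hlt | hge
          · exact Or.inl (Or.inr ⟨i, hi1, hlt, hyi⟩)
          · have : i = j := by omega
            subst this
            exact Or.inr (by rw [hx'] at hyi; exact (Option.some.inj hyi).symm)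

-- run of A's while loop when the walk never returns: the final v3 is not s
lemma Arun_noret (v2 : List Int) (v9 s : Int)
    (hno : ∀ k, ¬ pvRet v2 v9 s k) :
    ∀ fuel j v23 x, 1 ≤ j → pvX v2 s j = some x →
      (∀ i, 1 ≤ i → i < j → ∃ y, pvX v2 s i = some y ∧ 1 < y ∧ y ≤ v9) →
      (fn1While v2 v9 fuel v23 x (j : Int)).1 ≠ s := by
  intro fuel
  induction fuel with
  | zero =>
    intro j v23 x h1 hx hpre hcon
    simp only [fn1While] at hcon
    exact hno j ⟨h1, hcon ▸ hx, hpre⟩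
  | succ fuel ih =>
    intro j v23 x h1 hx hpre
    by_cases hc : 1 < x ∧ x ≤ v9 ∧ ¬ x ∈ v23
    · rw [fn1While, if_pos hc]
      cases hz : PySem.List.pyGet? v2 x with
      | none =>
        intro hcon
        have hcs : x = s := hcon
        exact hno j ⟨h1, hcs ▸ hx, hpre⟩
      | some z =>
        show (fn1While v2 v9 fuel (PySem.Set.add v23 x) z ((j : Int) + 1)).1 ≠ s
        have hXz : pvX v2 s (j + 1) = some z := by rw [pvX, hx]; simpa using hz
        have hcast : ((j : Int) + 1) = ((j + 1 : Nat) : Int) := by push_cast; ring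
        rw [hcast]
        refine ih (j + 1) _ z (by omega) hXz ?_
        intro i hi1 hij
        rcases Nat.lt_or_ge i j with hlt | hge
        · exact hpre i hi1 hlt
        · have : i = j := by omega
          subst this
          exact ⟨x, hx, hc.1, hc.2.1⟩
    · rw [fn1While, if_neg hc]
      intro hcon
      exact hno j ⟨h1, hcon ▸ hx, hpre⟩

-- run of B's loop when the walk first returns at step p ≤ n
lemma Brun_ret (v2 : List Int) (v9 s : Int) (p : Nat) (n : Int)
    (hp : pvRet v2 v9 s p) (hmin : ∀ q, q < p → ¬ pvRet v2 v9 s q) (hpn : (p : Int) ≤ n) :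
    ∀ d j x, 1 ≤ j → j ≤ p → p - j = d → pvX v2 s j = some x →
      firstReturnLoop v2 v9 s x (PySem.List.pyRange (j : Int) (n + 1) 1) = some (p : Int) := by
  intro d
  induction d with
  | zero =>
    intro j x h1 hjp hd hx
    have hj : j = p := by omega
    subst hj
    have hxs : x = s := by rw [hp.2.1] at hx; exact (Option.some.inj hx).symm
    rw [PySem.List.pyRange_one_cons (by exact_mod_cast by omega : (j : Int) < n + 1)]
    rw [firstReturnLoop, if_pos hxs]
  | succ d ih =>
    intro j x h1 hjp hd hx
    have hj : j < p := by omega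
    obtain ⟨x', hx', hx1, hx9⟩ := hp.2.2 j h1 hj
    have hxx : x' = x := by rw [hx'] at hx; exact Option.some.inj hx
    rw [hxx] at hx1 hx9 hx'
    have hnots : x ≠ s := fun h => pvRet_not_s v2 v9 s p hp hmin j h1 hj (h ▸ hx')
    have hnext : ∃ z, PySem.List.pyGet? v2 x = some z := by
      have hXj1 : pvX v2 s (j + 1) = (some x).bind (fun y => PySem.List.pyGet? v2 y) := by
        rw [pvX, hx']
      rcases Nat.eq_or_lt_of_le (Nat.succ_le_of_lt hj) with h | h
      · exact ⟨s, by have := hp.2.1; rw [← h, hXj1] at this; simpa using this⟩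
      · obtain ⟨z, hz, -⟩ := hp.2.2 (j + 1) (by omega) h
        exact ⟨z, by rw [hXj1] at hz; simpa using hz⟩
    obtain ⟨z, hz⟩ := hnext
    have hXz : pvX v2 s (j + 1) = some z := by rw [pvX, hx']; simpa using hz
    rw [PySem.List.pyRange_one_cons (by exact_mod_cast by omega : (j : Int) < n + 1)]
    rw [firstReturnLoop, if_neg hnots, if_neg (not_not.mpr ⟨hx1, hx9⟩)]
    rw [hz]
    have hcast : ((j : Int) + 1) = ((j + 1 : Nat) : Int) := by push_cast; ring
    rw [hcast]
    exact ih (j + 1) z (by omega) hj (by omega) hXz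

-- run of B's loop when the walk never returns
lemma Brun_noret (v2 : List Int) (v9 s : Int)
    (hno : ∀ k, ¬ pvRet v2 v9 s k) :
    ∀ l j x, 1 ≤ j → pvX v2 s j = some x →
      (∀ i, 1 ≤ i → i < j → ∃ y, pvX v2 s i = some y ∧ 1 < y ∧ y ≤ v9) →
      firstReturnLoop v2 v9 s x l = none := by
  intro l
  induction l with
  | nil => intro j x _ _ _; rw [firstReturnLoop]
  | cons k ks ih =>
    intro j x h1 hx hpre
    have hnots : x ≠ s := fun h => hno j ⟨h1, h ▸ hx, hpre⟩
    rw [firstReturnLoop, if_neg hnots]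
    by_cases hg : 1 < x ∧ x ≤ v9
    · rw [if_neg (by tauto)]
      cases hz : PySem.List.pyGet? v2 x with
      | none => rfl
      | some z =>
        show firstReturnLoop v2 v9 s z ks = none
        have hXz : pvX v2 s (j + 1) = some z := by rw [pvX, hx]; simpa using hz
        refine ih (j + 1) z (by omega) hXz ?_
        intro i hi1 hij
        rcases Nat.lt_or_ge i j with hlt | hge
        · exact hpre i hi1 hlt
        · have : i = j := by omega
          subst this
          exact ⟨x, hx, hg.1, hg.2⟩
    · rw [if_pos hg]

-- the two per-start bodies agree on every start 2 ≤ s < len(v2)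
lemma bodyEq (v2 : List Int) (v9 : Int) (hPre : Pre_fn_1 v2 v9) (s : Int)
    (hs2 : 2 ≤ s) (hsn : s < (v2.length : Int)) (st : Int × Int) :
    (match PySem.List.pyGet? v2 s with
     | some v30 =>
       let r := fn1While v2 v9 (v2.length + 2) (PySem.Set.ofList [s]) v30 1
       if r.1 = s ∧ r.2 > st.1 then (r.2, s) else st
     | none => st)
    = (match firstReturn v2 v9 s (v2.length : Int) with
       | some k => if k > st.1 then (k, s) else st
       | none => st) := by
  have hlen : s.toNat < v2.length := by omega
  obtain ⟨x1, hx1⟩ : ∃ x1, PySem.List.pyGet? v2 s = some x1 := by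
    refine ⟨v2[s.toNat], ?_⟩
    rw [PySem.List.pyGet?_of_nonneg v2 (show (0 : Int) ≤ s by omega)]
    exact List.getElem?_eq_some_iff.2 ⟨hlen, rfl⟩
  have hX1 : pvX v2 s 1 = some x1 := by simp [pvX, hx1]
  by_cases hex : ∃ k, pvRet v2 v9 s k
  · haveI := Classical.decPred (pvRet v2 v9 s)
    have hp := Nat.find_spec hex
    have hmin : ∀ q, q < Nat.find hex → ¬ pvRet v2 v9 s q := fun q hq => Nat.find_min hex hq
    have hplt : Nat.find hex < v2.length := pvRet_lt_len v2 v9 s _ hPre hs2 hsn hp hmin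
    have hA := Arun_ret v2 v9 s _ hp hmin (v2.length + 2) 1 (PySem.Set.ofList [s]) x1
      le_rfl hp.1 hX1 (by omega)
      (by
        intro y
        simp only [PySem.Set.mem_ofList, List.mem_singleton]
        constructor
        · exact fun h => Or.inl h
        · rintro (h | ⟨i, hi1, hi0, -⟩)
          · exact h
          · omega)
    have hB := Brun_ret v2 v9 s _ (v2.length : Int) hp hmin (by exact_mod_cast hplt.le)
      (Nat.find hex - 1) 1 x1 le_rfl hp.1 (by omega) hX1
    rw [Nat.cast_one] at hA hB
    have hfrB : firstReturn v2 v9 s (v2.length : Int) = some ((Nat.find hex : Int)) := by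
      unfold firstReturn; rw [hx1]; exact hB
    rw [hfrB, hx1]
    show (if (fn1While v2 v9 (v2.length + 2) (PySem.Set.ofList [s]) x1 1).1 = s ∧
            (fn1While v2 v9 (v2.length + 2) (PySem.Set.ofList [s]) x1 1).2 > st.1
          then ((fn1While v2 v9 (v2.length + 2) (PySem.Set.ofList [s]) x1 1).2, s) else st)
        = (if ((Nat.find hex : Int)) > st.1 then (((Nat.find hex : Int)), s) else st)
    rw [hA]
    by_cases hgt : ((Nat.find hex : Int)) > st.1 <;> simp [hgt]
  · have hno : ∀ k, ¬ pvRet v2 v9 s k := not_exists.mp hex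
    have hA := Arun_noret v2 v9 s hno (v2.length + 2) 1 (PySem.Set.ofList [s]) x1
      le_rfl hX1 (by intro i h1 hi1; omega)
    have hB := Brun_noret v2 v9 s hno (PySem.List.pyRange 1 ((v2.length : Int) + 1) 1) 1 x1
      le_rfl hX1 (by intro i h1 hi1; omega)
    rw [Nat.cast_one] at hA
    have hfrB : firstReturn v2 v9 s (v2.length : Int) = none := by
      unfold firstReturn; rw [hx1]; exact hB
    rw [hfrB, hx1]
    show (if (fn1While v2 v9 (v2.length + 2) (PySem.Set.ofList [s]) x1 1).1 = s ∧
            (fn1While v2 v9 (v2.length + 2) (PySem.Set.ofList [s]) x1 1).2 > st.1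
          then ((fn1While v2 v9 (v2.length + 2) (PySem.Set.ofList [s]) x1 1).2, s) else st)
        = st
    rw [if_neg (fun hcon => hA hcon.1)]

-- ===== VERDICT (by name: the statement is the Claim_ definition above) =====
theorem fn_1_spec : Claim_equal_fn_1 := by
  intro v2 v9 _ hPre
  unfold Spec_fn_1 fn_1 fn_1_alt
  refine congrArg Prod.snd (PySem.List.foldl_congr_mem _ _ _ _ ?_)
  intro acc x hx
  rw [PySem.List.mem_pyRange_one] at hx
  exact bodyEq v2 v9 hPre x hx.1 hx.2 acc
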